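-- pv_equiv track=rewrite | github.com/sarthakvarora/Data-Structures | mem.py | create_int
-- ===== SOURCE A (Python) =====
-- def create_int(b1, b2, b3, b4): # Done
--     b1,b2,b3,b4 = str(b1),str(b2),str(b3),str(b4)
--     num = 0
--     powr= 0
--     for i in range(len(b4)-2,-1,-1):
--         num = num + int(b4[i])*(2**(powr))
--         powr = powr + 1
--
--     for i in range(len(b3)-1,-1,-1):
--         num = num + int(b3[i])*(2**(powr))
--         powr = powr + 1
--
--     for i in range(len(b2)-1,-1,-1):
--         num = num + int(b2[i])*(2**(powr))
--         powr = powr + 1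
--
--     for i in range(len(b1)-1,-1,-1):
--         num = num + int(b1[i])*(2**(powr))
--         powr = powr + 1
--     return num
-- ===== SOURCE B (Python) =====
-- def create_int(b1, b2, b3, b4):
--     s = str(b1) + str(b2) + str(b3) + str(b4)[:-1]
--     num = 0
--     for ch in s:
--         num = num * 2 + int(ch)
--     return num
-- ===== Notes on version B (the rewrite author's own statement) =====
-- stated objective: simpler
-- what changed: Replaces A's four reversed index loops with explicit 2**powr weights by one forward Horner pass (num = num*2 + digit) over the single concatenated string str(b1)+str(b2)+str(b3)+str(b4)[:-1].
import Mathlib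
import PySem

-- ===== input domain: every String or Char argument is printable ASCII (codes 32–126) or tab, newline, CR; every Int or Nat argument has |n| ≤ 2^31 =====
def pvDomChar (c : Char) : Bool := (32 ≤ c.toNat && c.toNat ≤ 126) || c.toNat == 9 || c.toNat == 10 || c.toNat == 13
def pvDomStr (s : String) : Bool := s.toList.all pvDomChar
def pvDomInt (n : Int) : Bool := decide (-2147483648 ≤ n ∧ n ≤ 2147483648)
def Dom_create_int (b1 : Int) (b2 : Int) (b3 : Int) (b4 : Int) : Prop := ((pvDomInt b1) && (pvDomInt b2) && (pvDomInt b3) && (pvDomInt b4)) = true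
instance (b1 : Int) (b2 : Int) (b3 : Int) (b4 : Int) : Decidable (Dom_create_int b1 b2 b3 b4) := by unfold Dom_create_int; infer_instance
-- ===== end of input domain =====

-- B replaces A's four reversed index loops with explicit 2**powr weights by one forward
-- Horner pass over the concatenated digit string (objective: simpler).


-- ===== PORT A =====
-- int(c) on a single digit character; exact for digit chars, which is all Pre_ admits.
def pvDigit (c : Char) : Int := (c.toNat : Int) - 48

-- one of A's loops 'for i in range(len(s)-1,-1,-1): num += int(s[i])*2**powr; powr += 1':
-- the characters are visited from the last to the first, threading the state (num, powr).
def pvALoop (s : List Char) (st : Int × Nat) : Int × Nat :=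
  s.reverse.foldl (fun st c => (st.1 + pvDigit c * 2 ^ st.2, st.2 + 1)) st

def create_int (b1 : Int) (b2 : Int) (b3 : Int) (b4 : Int) : Int :=
  let s1 := (PySem.Int.toStr b1).toList
  let s2 := (PySem.Int.toStr b2).toList
  let s3 := (PySem.Int.toStr b3).toList
  let s4 := (PySem.Int.toStr b4).toList
  -- first loop runs over indices len(b4)-2 … 0, i.e. over b4 without its last character
  let st1 := pvALoop s4.dropLast (0, 0)
  let st2 := pvALoop s3 st1
  let st3 := pvALoop s2 st2
  let st4 := pvALoop s1 st3
  st4.1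

-- ===== PORT B =====
def create_int_alt (b1 : Int) (b2 : Int) (b3 : Int) (b4 : Int) : Int :=
  let s := (PySem.Int.toStr b1).toList ++ (PySem.Int.toStr b2).toList
        ++ (PySem.Int.toStr b3).toList ++ (PySem.Int.toStr b4).toList.dropLast
  s.foldl (fun num c => num * 2 + pvDigit c) 0

-- ===== PRECONDITION & SPEC =====
-- A raises ValueError on any negative argument (int('-') on the sign character); Pre_ excludes exactly those.
def Pre_create_int (b1 : Int) (b2 : Int) (b3 : Int) (b4 : Int) : Prop :=
  0 ≤ b1 ∧ 0 ≤ b2 ∧ 0 ≤ b3 ∧ 0 ≤ b4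
instance (b1 : Int) (b2 : Int) (b3 : Int) (b4 : Int) : Decidable (Pre_create_int b1 b2 b3 b4) := by unfold Pre_create_int; infer_instance
def pvWitness_create_int : Int × Int × Int × Int := (1, 0, 1, 10)

def Spec_create_int (b1 : Int) (b2 : Int) (b3 : Int) (b4 : Int) (out : Int) : Prop := out = create_int_alt b1 b2 b3 b4
instance (b1 : Int) (b2 : Int) (b3 : Int) (b4 : Int) (out : Int) : Decidable (Spec_create_int b1 b2 b3 b4 out) := by unfold Spec_create_int; infer_instance

-- ===== CLAIM (what is proved, stated in full; the proofs are below) =====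
def Claim_equal_create_int : Prop := ∀ (b1 : Int) (b2 : Int) (b3 : Int) (b4 : Int), Dom_create_int b1 b2 b3 b4 → Pre_create_int b1 b2 b3 b4 → Spec_create_int b1 b2 b3 b4 (create_int b1 b2 b3 b4)

-- ===== LEMMAS AND PROOFS =====
theorem pvHorner_shift (s : List Char) (n : Int) :
    s.foldl (fun num c => num * 2 + pvDigit c) n
      = n * 2 ^ s.length + s.foldl (fun num c => num * 2 + pvDigit c) 0 := by
  induction s generalizing n with
  | nil => simp
  | cons c t ih =>
    simp only [List.foldl_cons, List.length_cons]
    rw [ih (n * 2 + pvDigit c), ih (0 * 2 + pvDigit c)]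
    ring

theorem pvALoop_spec (s : List Char) (num : Int) (powr : Nat) :
    pvALoop s (num, powr)
      = (num + s.foldl (fun num c => num * 2 + pvDigit c) 0 * 2 ^ powr, powr + s.length) := by
  rw [show s = s.reverse.reverse by simp]
  generalize s.reverse = t
  induction t generalizing num powr with
  | nil => simp [pvALoop]
  | cons c t ih =>
    simp only [pvALoop, List.reverse_reverse, List.foldl_cons] at *
    rw [ih (num + pvDigit c * 2 ^ powr) (powr + 1)]
    simp only [List.reverse_cons, List.foldl_append, List.foldl_cons, List.foldl_nil,
      List.length_append, List.length_cons, List.length_nil, Prod.mk.injEq]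
    constructor
    · ring
    · omega

-- ===== VERDICT (by name: the statement is the Claim_ definition above) =====
theorem create_int_spec : Claim_equal_create_int := by
  intro b1 b2 b3 b4 _ _
  show create_int b1 b2 b3 b4 = create_int_alt b1 b2 b3 b4
  simp only [create_int, create_int_alt]
  generalize (PySem.Int.toStr b1).toList = s1
  generalize (PySem.Int.toStr b2).toList = s2
  generalize (PySem.Int.toStr b3).toList = s3
  generalize (PySem.Int.toStr b4).toList.dropLast = s4
  rw [pvALoop_spec, pvALoop_spec, pvALoop_spec, pvALoop_spec]
  simp only [List.foldl_append]
  conv_rhs => rw [pvHorner_shift s4, pvHorner_shift s3, pvHorner_shift s2]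
  simp only [pow_add]
  ring
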